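-- pv_equiv track=rewrite | github.com/irishNoah/Algorithm-Study | Programmers(프로그래머스)/LV2/연습문제/프로그래머스 LV2 - JadenCase 문자열 만들기.py | solution
-- ===== SOURCE A (Python) =====
-- def solution(s):
--     answer = ''
--
--     # s의 구성 문자 중 띄어쓰기(' ')를 만났을 때 체크 비트로 사용할 변수 check_null
--     # check_null을 사용하는 이유는 공백 이후에 있는 문자가 소문자일 경우 대문자로 변환해야 해주기 때문이다.
--     check_null = 0
--
--     # for문을 이용해서 s의 각 구성 문자에 접근
--     for i in range(0, len(s)):
--
--         # 띄어쓰기(' ')를 만났을 때 answer에 ' '를 더해주고, check_null은 0을 초기화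
--         if s[i] == ' ':
--             answer += s[i]
--             check_null = 0
--
--         # check_null이 0이고 s의 요소가 알파벳이 아닐 경우(예 : 숫자)
--         # s의 요소를 answer에 더해주고, check_null에 1을 할당
--         elif check_null == 0 and s[i].isalpha() == 0:
--             answer += s[i]
--             check_null = 1
--
--         # check_null이 0이고 s의 요소가 알파벳일 경우
--         # s의 요소를 대문자로 변경한 후 answer에 더해주고, check_null에 1을 할당
--         elif check_null == 0 and s[i].isalpha() == 1:
--             answer += s[i].upper()
--             check_null = 1
--
--         # 그 외의 경우에는 s의 구성 요소를 소문자로 변경한 후 answer에 더해줌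
--         else :
--             answer += s[i].lower()
--
--     return answer
-- ===== SOURCE B (Python) =====
-- def solution(s):
--     return ' '.join(w[:1].upper() + w[1:].lower() for w in s.split(' '))
-- ===== Notes on version B (the rewrite author's own statement) =====
-- stated objective: simpler
-- what changed: Replaces the character-by-character scan with a check_null state flag by word-level processing: split on single spaces, capitalize each word's first character and lowercase the rest, rejoin with spaces.
import Mathlib
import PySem

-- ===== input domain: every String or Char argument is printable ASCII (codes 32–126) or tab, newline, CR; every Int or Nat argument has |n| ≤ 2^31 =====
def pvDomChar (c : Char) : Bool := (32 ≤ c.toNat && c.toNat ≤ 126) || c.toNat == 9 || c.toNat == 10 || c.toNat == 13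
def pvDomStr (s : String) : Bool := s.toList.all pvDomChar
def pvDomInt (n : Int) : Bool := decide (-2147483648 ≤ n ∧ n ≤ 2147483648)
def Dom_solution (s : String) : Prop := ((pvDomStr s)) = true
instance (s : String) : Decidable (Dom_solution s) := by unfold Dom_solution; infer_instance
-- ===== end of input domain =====

-- B replaces A's per-character scan with a check_null flag by word-level processing
-- (split on ' ', capitalize each word's head, lowercase the rest, rejoin): simpler decomposition.


-- ===== PORT A =====
-- loop body of A: state = (answer, check_null)
def solutionStep (st : List Char × Int) (c : Char) : List Char × Int :=
  if c = ' ' then (st.1 ++ [c], 0)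
  else if st.2 == 0 && !(PySem.Chars.isalpha c) then (st.1 ++ [c], 1)
  else if st.2 == 0 && PySem.Chars.isalpha c then (st.1 ++ [PySem.Chars.upperChar c], 1)
  else (st.1 ++ [PySem.Chars.lowerChar c], st.2)

def solution (s : String) : String :=
  String.mk
    ((PySem.List.pyRange 0 (PySem.List.len s.toList) 1).foldl
      (fun st i => solutionStep st (PySem.List.pyGetD s.toList i ' ')) ([], (0 : Int))).1

-- ===== PORT B =====
-- w[:1].upper() + w[1:].lower()
def jadenWord (w : List Char) : List Char :=
  PySem.Chars.upper (w.take 1) ++ PySem.Chars.lower (w.drop 1)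

def solution_alt (s : String) : String :=
  String.mk (List.intercalate [' '] ((s.toList.splitOn ' ').map jadenWord))

-- ===== PRECONDITION & SPEC =====
def Spec_solution (s : String) (out : String) : Prop := out = solution_alt s
instance (s : String) (out : String) : Decidable (Spec_solution s out) := by unfold Spec_solution; infer_instance

-- ===== CLAIM (what is proved, stated in full; the proofs are below) =====
def Claim_equal_solution : Prop := ∀ (s : String), Dom_solution s → Spec_solution s (solution s)

-- ===== LEMMAS AND PROOFS =====

-- common specification: JadenCase of the remaining characters; the Bool is "at start of a word"
def jcase : List Char → Bool → List Char
  | [], _ => []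
  | c :: t, st =>
    if c = ' ' then ' ' :: jcase t true
    else if st then
      (if PySem.Chars.isalpha c then PySem.Chars.upperChar c else c) :: jcase t false
    else PySem.Chars.lowerChar c :: jcase t false

lemma solution_foldl (cs : List Char) : ∀ (acc : List Char) (chk : Int),
    (cs.foldl solutionStep (acc, chk)).1 = acc ++ jcase cs (chk == 0) := by
  induction cs with
  | nil => intro acc chk; simp [jcase]
  | cons c t ih =>
    intro acc chk
    by_cases hc : c = ' '
    · simp [solutionStep, hc, jcase, ih]
    · by_cases hchk : chk == 0
      · by_cases ha : PySem.Chars.isalpha c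
        · simp [solutionStep, hc, hchk, ha, jcase, ih]
        · simp [solutionStep, hc, hchk, ha, jcase, ih]
      · have hchk' : (chk == 0) = false := by simpa using hchk
        simp [solutionStep, hc, hchk', jcase, ih]

lemma upperChar_of_not_alpha (c : Char) (h : ¬ PySem.Chars.isalpha c = true) :
    PySem.Chars.upperChar c = c := by
  simp only [PySem.Chars.isalpha, Bool.or_eq_true, not_or] at h
  simp [PySem.Chars.upperChar, h.2]

-- join of the words after the first one
def tj (ws : List (List Char)) : List Char :=
  ws.flatMap (fun w => ' ' :: jadenWord w)

lemma intercalate_eq_tj (x : List Char) (ws : List (List Char)) :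
    List.intercalate [' '] (x :: ws.map jadenWord) = x ++ tj ws := by
  induction ws generalizing x with
  | nil => simp [tj, List.intercalate]
  | cons w ws ih => simp_all [tj, List.intercalate]

lemma splitOn_space_cons (t : List Char) :
    (' ' :: t).splitOn ' ' = [] :: t.splitOn ' ' := by
  simp [List.splitOn, List.splitOnP_cons]

lemma splitOn_cons_of_ne (c : Char) (t : List Char) (h : ¬ c = ' ') :
    (c :: t).splitOn ' ' = (t.splitOn ' ').modifyHead (c :: ·) := by
  simp [List.splitOn, List.splitOnP_cons, h]

lemma splitOn_ne_nil (t : List Char) : t.splitOn ' ' ≠ [] :=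
  List.splitOnP_ne_nil _ t

-- head/tail of the split, joined; the head processed by f
def jb (f : List Char → List Char) (cs : List Char) : List Char :=
  f ((cs.splitOn ' ').headI) ++ tj ((cs.splitOn ' ').tail)

lemma jb_spec (cs : List Char) :
    jb jadenWord cs = jcase cs true ∧ jb PySem.Chars.lower cs = jcase cs false := by
  induction cs with
  | nil => constructor <;> simp [jb, tj, jadenWord, PySem.Chars.lower, PySem.Chars.upper, jcase]
  | cons c t ih =>
    obtain ⟨ih1, ih2⟩ := ih
    by_cases hc : c = ' '
    · subst hc
      have hs := splitOn_space_cons t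
      have hne := splitOn_ne_nil t
      obtain ⟨w, ws, hw⟩ := List.exists_cons_of_ne_nil hne
      constructor <;>
        simp_all [jb, tj, jcase, jadenWord, PySem.Chars.lower, PySem.Chars.upper]
    · have hs := splitOn_cons_of_ne c t hc
      have hne := splitOn_ne_nil t
      obtain ⟨w, ws, hw⟩ := List.exists_cons_of_ne_nil hne
      have ih2' : PySem.Chars.lower w ++ tj ws = jcase t false := by
        rw [← ih2]; simp [jb, hw]
      have hhead : jadenWord (c :: w) = PySem.Chars.upperChar c :: PySem.Chars.lower w := by
        simp [jadenWord, PySem.Chars.upper]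
      constructor
      · rw [jb, hs, hw]
        simp only [List.modifyHead, List.headI, List.tail]
        rw [jcase, if_neg hc, if_pos rfl]
        by_cases ha : PySem.Chars.isalpha c
        · simp [ha, hhead, ← ih2']
        · simp [ha, hhead, upperChar_of_not_alpha c ha, ← ih2']
      · rw [jb, hs, hw]
        simp only [List.modifyHead, List.headI, List.tail]
        rw [jcase, if_neg hc]
        simp only [if_neg (by simp : ¬ false = true)]
        rw [show PySem.Chars.lower (c :: w) = PySem.Chars.lowerChar c :: PySem.Chars.lower w from rfl]
        simp [← ih2']

lemma alt_eq_jcase (cs : List Char) :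
    List.intercalate [' '] ((cs.splitOn ' ').map jadenWord) = jcase cs true := by
  obtain ⟨w, ws, hw⟩ := List.exists_cons_of_ne_nil (splitOn_ne_nil cs)
  have := (jb_spec cs).1
  rw [jb, hw] at this
  rw [hw, List.map_cons, intercalate_eq_tj]
  simpa using this

-- ===== VERDICT (by name: the statement is the Claim_ definition above) =====
theorem solution_spec : Claim_equal_solution := by
  intro s _
  unfold Spec_solution solution solution_alt
  rw [PySem.List.foldl_pyRange_zero_pyGetD]
  rw [solution_foldl s.toList [] 0]
  simp [alt_eq_jcase]
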